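-- pv_equiv track=rewrite | github.com/moejun/PyChineseChess | stats.py | getUsersStat
-- ===== SOURCE A (Python) =====
-- def getUsersStat(ulist, data):
--     """
--     Analyze retrieved data and count the number of win, lose, and, draw
--     :param ulist: list of users
--     :param data: db data
--     :return: analyze result.
--     """
--     re_dic = {}
--     dlen1 = len(data)
--     ulen1 = len(ulist)
--     for j in range(0, ulen1):
--         win = 0
--         lost = 0
--         draw = 0
--         for i in range(0, dlen1):
--             if(data[i][3] == 'red' and data[i][1] == ulist[j]) or \
--                     (data[i][3] == 'black' and data[i][2] == ulist[j]):
--                 win += 1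
--             if(data[i][3] == 'red' and data[i][2] == ulist[j]) or \
--                     (data[i][3] == 'black' and data[i][1] == ulist[j]):
--                 lost += 1
--
--             if data[i][3] == 'Draw' and (data[i][2] == ulist[j] or data[i][1] == ulist[j]):
--                 draw += 1
--
--         re_dic[ulist[j]] = [str(win), str(lost), str(draw)]
--
--     return re_dic
-- ===== SOURCE B (Python) =====
-- def getUsersStat(ulist, data):
--     """Single pass over data: per-user [win, lose, draw] counters in a dict
--     initialized from ulist, then formatted as strings."""
--     counts = {u: [0, 0, 0] for u in ulist}
--     for rec in data:
--         red, black, flag = rec[1], rec[2], rec[3]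
--         if flag == 'red':
--             if red in counts:
--                 counts[red][0] += 1
--             if black in counts:
--                 counts[black][1] += 1
--         elif flag == 'black':
--             if black in counts:
--                 counts[black][0] += 1
--             if red in counts:
--                 counts[red][1] += 1
--         elif flag == 'Draw':
--             if red in counts:
--                 counts[red][2] += 1
--             if black != red and black in counts:
--                 counts[black][2] += 1
--     return {u: [str(w), str(l), str(d)] for u, (w, l, d) in counts.items()}
-- ===== Notes on version B (the rewrite author's own statement) =====
-- stated objective: faster
-- what changed: Replaces the per-user rescan of all records (nested loops) by a single pass over the records that increments win/lose/draw counters in a dict initialized from ulist.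
import Mathlib
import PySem

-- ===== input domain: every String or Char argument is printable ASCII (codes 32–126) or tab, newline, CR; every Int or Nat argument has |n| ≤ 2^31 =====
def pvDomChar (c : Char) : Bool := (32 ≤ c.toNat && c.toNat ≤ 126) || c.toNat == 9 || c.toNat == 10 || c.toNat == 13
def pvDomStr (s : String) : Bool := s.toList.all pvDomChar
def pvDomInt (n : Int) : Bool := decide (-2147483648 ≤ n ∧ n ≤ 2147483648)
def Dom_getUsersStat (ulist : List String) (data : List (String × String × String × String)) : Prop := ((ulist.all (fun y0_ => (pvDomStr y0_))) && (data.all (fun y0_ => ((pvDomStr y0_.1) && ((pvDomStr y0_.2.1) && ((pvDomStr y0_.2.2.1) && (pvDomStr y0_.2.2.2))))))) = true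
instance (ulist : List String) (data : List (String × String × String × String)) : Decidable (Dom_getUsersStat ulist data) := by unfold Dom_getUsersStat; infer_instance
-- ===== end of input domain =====

-- B replaces A's per-user rescan of all records (O(U*D)) by a single pass over the
-- records incrementing per-user counters in a dict initialized from ulist (O(U+D)).

-- ===== PORT A =====
-- literal transliteration of A: for each user, scan all records counting win/lost/draw
def getUsersStat (ulist : List String) (data : List (String × String × String × String)) : List (String × List String) :=
  let re_dic : PySem.Dict String (List String) := PySem.Dict.empty
  let dlen1 : Int := PySem.List.len data
  let ulen1 : Int := PySem.List.len ulist
  let re_dic := (PySem.List.pyRange 0 ulen1 1).foldl (fun re_dic j =>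
    let u := PySem.List.pyGetD ulist j ""
    let c := (PySem.List.pyRange 0 dlen1 1).foldl (fun (acc : Int × Int × Int) i =>
      let r := PySem.List.pyGetD data i ("", "", "", "")
      ((if (r.2.2.2 == "red" && r.2.1 == u) || (r.2.2.2 == "black" && r.2.2.1 == u) then acc.1 + 1 else acc.1),
       (if (r.2.2.2 == "red" && r.2.2.1 == u) || (r.2.2.2 == "black" && r.2.1 == u) then acc.2.1 + 1 else acc.2.1),
       (if r.2.2.2 == "Draw" && (r.2.2.1 == u || r.2.1 == u) then acc.2.2 + 1 else acc.2.2)))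
      ((0 : Int), (0 : Int), (0 : Int))
    re_dic.insert u [PySem.Int.toStr c.1, PySem.Int.toStr c.2.1, PySem.Int.toStr c.2.2]) re_dic
  re_dic.items

-- ===== PORT B =====
-- 'if k in counts: counts[k] = f(counts[k])' (guarded in-place increment)
def pvBump (d : PySem.Dict String (Int × Int × Int)) (k : String)
    (f : Int × Int × Int → Int × Int × Int) : PySem.Dict String (Int × Int × Int) :=
  if d.contains k then d.modify k ((0 : Int), (0 : Int), (0 : Int)) f else d

-- literal transliteration of B (Source B): counters dict from ulist, one pass over data
def getUsersStat_alt (ulist : List String) (data : List (String × String × String × String)) : List (String × List String) :=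
  let counts : PySem.Dict String (Int × Int × Int) :=
    ulist.foldl (fun d u => d.insert u ((0 : Int), (0 : Int), (0 : Int))) PySem.Dict.empty
  let counts := data.foldl (fun counts rec =>
    let red := rec.2.1
    let black := rec.2.2.1
    let flag := rec.2.2.2
    if flag == "red" then
      pvBump (pvBump counts red (fun t => (t.1 + 1, t.2.1, t.2.2))) black (fun t => (t.1, t.2.1 + 1, t.2.2))
    else if flag == "black" then
      pvBump (pvBump counts black (fun t => (t.1 + 1, t.2.1, t.2.2))) red (fun t => (t.1, t.2.1 + 1, t.2.2))
    else if flag == "Draw" then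
      let c1 := pvBump counts red (fun t => (t.1, t.2.1, t.2.2 + 1))
      if black != red then pvBump c1 black (fun t => (t.1, t.2.1, t.2.2 + 1)) else c1
    else counts) counts
  (counts.items.foldl (fun d p =>
      d.insert p.1 [PySem.Int.toStr p.2.1, PySem.Int.toStr p.2.2.1, PySem.Int.toStr p.2.2.2])
    PySem.Dict.empty).items

-- ===== PRECONDITION & SPEC =====
def Spec_getUsersStat (ulist : List String) (data : List (String × String × String × String)) (out : List (String × List String)) : Prop := out = getUsersStat_alt ulist data
instance (ulist : List String) (data : List (String × String × String × String)) (out : List (String × List String)) : Decidable (Spec_getUsersStat ulist data out) := by unfold Spec_getUsersStat; infer_instance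

-- ===== CLAIM (what is proved, stated in full; the proofs are below) =====
def Claim_equal_getUsersStat : Prop := ∀ (ulist : List String) (data : List (String × String × String × String)), Dom_getUsersStat ulist data → Spec_getUsersStat ulist data (getUsersStat ulist data)

-- ===== LEMMAS AND PROOFS =====

-- the three predicates both programs count
def pvW (u : String) (r : String × String × String × String) : Bool :=
  (r.2.2.2 == "red" && r.2.1 == u) || (r.2.2.2 == "black" && r.2.2.1 == u)
def pvL (u : String) (r : String × String × String × String) : Bool :=
  (r.2.2.2 == "red" && r.2.2.1 == u) || (r.2.2.2 == "black" && r.2.1 == u)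
def pvD (u : String) (r : String × String × String × String) : Bool :=
  r.2.2.2 == "Draw" && (r.2.2.1 == u || r.2.1 == u)

def pvCnt (data : List (String × String × String × String)) (u : String) : Int × Int × Int :=
  ((data.countP (pvW u) : Int), (data.countP (pvL u) : Int), (data.countP (pvD u) : Int))

def pvVal (data : List (String × String × String × String)) (u : String) : List String :=
  [PySem.Int.toStr (pvCnt data u).1, PySem.Int.toStr (pvCnt data u).2.1, PySem.Int.toStr (pvCnt data u).2.2]

def pvCanon (ulist : List String) (data : List (String × String × String × String)) : List (String × List String) :=
  (PySem.Set.ofList ulist).map (fun u => (u, pvVal data u))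

-- getD through a fold of inserts whose value depends only on the key
theorem pv_getD_foldl_insert_val {ν : Type} (v : String → ν) :
    ∀ (l : List String) (d : PySem.Dict String ν) (k : String) (dflt : ν),
      (l.foldl (fun d u => d.insert u (v u)) d).getD k dflt
        = if k ∈ l then v k else d.getD k dflt := by
  intro l
  induction l with
  | nil => intro d k dflt; simp
  | cons x t ih =>
      intro d k dflt
      simp only [List.foldl_cons, ih, PySem.Dict.getD_insert, List.mem_cons]
      by_cases hkt : k ∈ t <;> by_cases hkx : k = x <;> simp [hkt, hkx]

theorem pv_items_foldl_insert_val {ν : Type} (v : String → ν) (l : List String) :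
    (l.foldl (fun d u => d.insert u (v u)) PySem.Dict.empty).items
      = (PySem.Set.ofList l).map (fun u => (u, v u)) := by
  have hnd : (l.foldl (fun d u => d.insert u (v u)) PySem.Dict.empty).keys.Nodup :=
    PySem.Dict.nodup_keys_foldl_insert l (fun _ u => v u) _ (by simp)
  have hk : (l.foldl (fun d u => d.insert u (v u)) PySem.Dict.empty).keys = PySem.Set.ofList l := by
    have := PySem.Dict.keys_foldl_insert (ν := ν) l (fun _ u => v u) PySem.Dict.empty
    simpa [PySem.Set.update, PySem.Set.ofList] using this
  rw [PySem.Dict.items_eq_map_keys _ hnd (v l.headI), hk]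
  apply List.map_congr_left
  intro u hu
  have hul : u ∈ l := (PySem.Set.mem_ofList l u).mp hu
  rw [pv_getD_foldl_insert_val, if_pos hul]

-- ===== A-side =====

theorem pv_inner (u : String) :
    ∀ (data : List (String × String × String × String)) (a b c : Int),
      List.foldl (fun (acc : Int × Int × Int) r =>
        ((if (r.2.2.2 == "red" && r.2.1 == u) || (r.2.2.2 == "black" && r.2.2.1 == u) then acc.1 + 1 else acc.1),
         (if (r.2.2.2 == "red" && r.2.2.1 == u) || (r.2.2.2 == "black" && r.2.1 == u) then acc.2.1 + 1 else acc.2.1),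
         (if r.2.2.2 == "Draw" && (r.2.2.1 == u || r.2.1 == u) then acc.2.2 + 1 else acc.2.2)))
        (a, b, c) data
      = (a + (data.countP (pvW u) : Int), b + (data.countP (pvL u) : Int), c + (data.countP (pvD u) : Int)) := by
  intro data
  induction data with
  | nil => intro a b c; simp
  | cons r rest ih =>
      intro a b c
      simp only [List.foldl_cons]
      rw [ih]
      simp only [List.countP_cons, pvW, pvL, pvD, Prod.mk.injEq]
      refine ⟨?_, ?_, ?_⟩ <;> split_ifs <;> push_cast <;> ring

theorem pv_A_eq_canon (ulist : List String) (data : List (String × String × String × String)) :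
    getUsersStat ulist data = pvCanon ulist data := by
  unfold getUsersStat
  simp only []
  rw [PySem.List.foldl_pyRange_zero_pyGetD ulist ""
    (fun re_dic u => re_dic.insert u
      [PySem.Int.toStr (List.foldl (fun (acc : Int × Int × Int) i =>
          ((if ((PySem.List.pyGetD data i ("", "", "", "")).2.2.2 == "red" && (PySem.List.pyGetD data i ("", "", "", "")).2.1 == u) || ((PySem.List.pyGetD data i ("", "", "", "")).2.2.2 == "black" && (PySem.List.pyGetD data i ("", "", "", "")).2.2.1 == u) then acc.1 + 1 else acc.1),
           (if ((PySem.List.pyGetD data i ("", "", "", "")).2.2.2 == "red" && (PySem.List.pyGetD data i ("", "", "", "")).2.2.1 == u) || ((PySem.List.pyGetD data i ("", "", "", "")).2.2.2 == "black" && (PySem.List.pyGetD data i ("", "", "", "")).2.1 == u) then acc.2.1 + 1 else acc.2.1),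
           (if (PySem.List.pyGetD data i ("", "", "", "")).2.2.2 == "Draw" && ((PySem.List.pyGetD data i ("", "", "", "")).2.2.1 == u || (PySem.List.pyGetD data i ("", "", "", "")).2.1 == u) then acc.2.2 + 1 else acc.2.2)))
          ((0 : Int), (0 : Int), (0 : Int)) (PySem.List.pyRange 0 (PySem.List.len data) 1)).1,
       PySem.Int.toStr (List.foldl (fun (acc : Int × Int × Int) i =>
          ((if ((PySem.List.pyGetD data i ("", "", "", "")).2.2.2 == "red" && (PySem.List.pyGetD data i ("", "", "", "")).2.1 == u) || ((PySem.List.pyGetD data i ("", "", "", "")).2.2.2 == "black" && (PySem.List.pyGetD data i ("", "", "", "")).2.2.1 == u) then acc.1 + 1 else acc.1),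
           (if ((PySem.List.pyGetD data i ("", "", "", "")).2.2.2 == "red" && (PySem.List.pyGetD data i ("", "", "", "")).2.2.1 == u) || ((PySem.List.pyGetD data i ("", "", "", "")).2.2.2 == "black" && (PySem.List.pyGetD data i ("", "", "", "")).2.1 == u) then acc.2.1 + 1 else acc.2.1),
           (if (PySem.List.pyGetD data i ("", "", "", "")).2.2.2 == "Draw" && ((PySem.List.pyGetD data i ("", "", "", "")).2.2.1 == u || (PySem.List.pyGetD data i ("", "", "", "")).2.1 == u) then acc.2.2 + 1 else acc.2.2)))
          ((0 : Int), (0 : Int), (0 : Int)) (PySem.List.pyRange 0 (PySem.List.len data) 1)).2.1,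
       PySem.Int.toStr (List.foldl (fun (acc : Int × Int × Int) i =>
          ((if ((PySem.List.pyGetD data i ("", "", "", "")).2.2.2 == "red" && (PySem.List.pyGetD data i ("", "", "", "")).2.1 == u) || ((PySem.List.pyGetD data i ("", "", "", "")).2.2.2 == "black" && (PySem.List.pyGetD data i ("", "", "", "")).2.2.1 == u) then acc.1 + 1 else acc.1),
           (if ((PySem.List.pyGetD data i ("", "", "", "")).2.2.2 == "red" && (PySem.List.pyGetD data i ("", "", "", "")).2.2.1 == u) || ((PySem.List.pyGetD data i ("", "", "", "")).2.2.2 == "black" && (PySem.List.pyGetD data i ("", "", "", "")).2.1 == u) then acc.2.1 + 1 else acc.2.1),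
           (if (PySem.List.pyGetD data i ("", "", "", "")).2.2.2 == "Draw" && ((PySem.List.pyGetD data i ("", "", "", "")).2.2.1 == u || (PySem.List.pyGetD data i ("", "", "", "")).2.1 == u) then acc.2.2 + 1 else acc.2.2)))
          ((0 : Int), (0 : Int), (0 : Int)) (PySem.List.pyRange 0 (PySem.List.len data) 1)).2.2])
    PySem.Dict.empty]
  rw [PySem.List.foldl_congr_mem _ _ (fun d u => d.insert u (pvVal data u)) _ ?_]
  · rw [pv_items_foldl_insert_val (pvVal data) ulist]; rfl
  · intro acc x hx
    simp only []
    rw [PySem.List.foldl_pyRange_zero_pyGetD data ("", "", "", "")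
      (fun (acc : Int × Int × Int) r =>
        ((if (r.2.2.2 == "red" && r.2.1 == x) || (r.2.2.2 == "black" && r.2.2.1 == x) then acc.1 + 1 else acc.1),
         (if (r.2.2.2 == "red" && r.2.2.1 == x) || (r.2.2.2 == "black" && r.2.1 == x) then acc.2.1 + 1 else acc.2.1),
         (if r.2.2.2 == "Draw" && (r.2.2.1 == x || r.2.1 == x) then acc.2.2 + 1 else acc.2.2)))
      ((0 : Int), (0 : Int), (0 : Int))]
    rw [pv_inner]
    simp [pvVal, pvCnt]

-- ===== B-side =====

theorem pv_keys_bump (d : PySem.Dict String (Int × Int × Int)) (k : String) (f) :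
    (pvBump d k f).keys = d.keys := by
  unfold pvBump
  split
  · rw [PySem.Dict.keys_modify]
    exact PySem.Dict.keys_insert_of_contains _ _ (by assumption)
  · rfl

theorem pv_contains_bump (d : PySem.Dict String (Int × Int × Int)) (k u : String) (f) :
    (pvBump d k f).contains u = d.contains u := by
  rw [PySem.Dict.contains_eq_decide_mem_keys, PySem.Dict.contains_eq_decide_mem_keys, pv_keys_bump]

theorem pv_getD_bump (d : PySem.Dict String (Int × Int × Int)) (k u : String) (f)
    (hu : d.contains u = true) :
    (pvBump d k f).getD u ((0 : Int), (0 : Int), (0 : Int))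
      = if u = k then f (d.getD u ((0 : Int), (0 : Int), (0 : Int)))
        else d.getD u ((0 : Int), (0 : Int), (0 : Int)) := by
  unfold pvBump
  by_cases hk : d.contains k = true
  · rw [if_pos hk, PySem.Dict.getD_modify]
    by_cases huk : u = k
    · subst huk; simp
    · simp [huk]
  · rw [if_neg hk]
    have hne : ¬ u = k := fun h => hk (h ▸ hu)
    rw [if_neg hne]

-- one step of B's data loop (proof-side name for the loop body of the port)
def pvStepB (counts : PySem.Dict String (Int × Int × Int)) (rec : String × String × String × String) :
    PySem.Dict String (Int × Int × Int) :=
  if rec.2.2.2 == "red" then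
    pvBump (pvBump counts rec.2.1 (fun t => (t.1 + 1, t.2.1, t.2.2))) rec.2.2.1 (fun t => (t.1, t.2.1 + 1, t.2.2))
  else if rec.2.2.2 == "black" then
    pvBump (pvBump counts rec.2.2.1 (fun t => (t.1 + 1, t.2.1, t.2.2))) rec.2.1 (fun t => (t.1, t.2.1 + 1, t.2.2))
  else if rec.2.2.2 == "Draw" then
    if rec.2.2.1 != rec.2.1 then
      pvBump (pvBump counts rec.2.1 (fun t => (t.1, t.2.1, t.2.2 + 1))) rec.2.2.1 (fun t => (t.1, t.2.1, t.2.2 + 1))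
    else pvBump counts rec.2.1 (fun t => (t.1, t.2.1, t.2.2 + 1))
  else counts

theorem pv_keys_stepB (counts : PySem.Dict String (Int × Int × Int)) (rec) :
    (pvStepB counts rec).keys = counts.keys := by
  unfold pvStepB
  split_ifs <;> simp [pv_keys_bump]

theorem pv_contains_stepB (counts : PySem.Dict String (Int × Int × Int)) (rec) (u : String) :
    (pvStepB counts rec).contains u = counts.contains u := by
  rw [PySem.Dict.contains_eq_decide_mem_keys, PySem.Dict.contains_eq_decide_mem_keys, pv_keys_stepB]

theorem pv_getD_stepB (counts : PySem.Dict String (Int × Int × Int)) (rec) (u : String)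
    (hu : counts.contains u = true) :
    (pvStepB counts rec).getD u ((0 : Int), (0 : Int), (0 : Int))
      = ((counts.getD u ((0 : Int), (0 : Int), (0 : Int))).1 + (if pvW u rec then 1 else 0),
         (counts.getD u ((0 : Int), (0 : Int), (0 : Int))).2.1 + (if pvL u rec then 1 else 0),
         (counts.getD u ((0 : Int), (0 : Int), (0 : Int))).2.2 + (if pvD u rec then 1 else 0)) := by
  obtain ⟨o, red, black, flag⟩ := rec
  unfold pvStepB pvW pvL pvD
  by_cases hf1 : flag = "red"
  · subst hf1
    have hb1 : (pvBump counts red (fun t => (t.1 + 1, t.2.1, t.2.2))).contains u = true := by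
      rw [pv_contains_bump]; exact hu
    have hne : (("red" : String) == "Draw") = false := by decide
    have hne' : (("red" : String) == "black") = false := by decide
    simp only [beq_self_eq_true, if_true, hne, hne', Bool.false_eq_true, if_false]
    rw [pv_getD_bump _ _ _ _ hb1, pv_getD_bump _ _ _ _ hu]
    by_cases h1 : u = red
    · subst h1
      by_cases h2 : u = black
      · subst h2; simp
      · have h2' : ¬ black = u := fun h => h2 h.symm
        simp [h2, h2']
    · have h1' : ¬ red = u := fun h => h1 h.symm
      by_cases h2 : u = black
      · subst h2; simp [h1, h1']
      · have h2' : ¬ black = u := fun h => h2 h.symm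
        simp [h1, h2, h1', h2']
  · by_cases hf2 : flag = "black"
    · subst hf2
      have hb1 : (pvBump counts black (fun t => (t.1 + 1, t.2.1, t.2.2))).contains u = true := by
        rw [pv_contains_bump]; exact hu
      have hne : (("black" : String) == "red") = false := by decide
      have hne' : (("black" : String) == "Draw") = false := by decide
      simp only [hne, hne', Bool.false_eq_true, if_false, beq_self_eq_true, if_true]
      rw [pv_getD_bump _ _ _ _ hb1, pv_getD_bump _ _ _ _ hu]
      by_cases h1 : u = red
      · subst h1
        by_cases h2 : u = black
        · subst h2; simp
        · have h2' : ¬ black = u := fun h => h2 h.symm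
          simp [h2, h2']
      · have h1' : ¬ red = u := fun h => h1 h.symm
        by_cases h2 : u = black
        · subst h2; simp [h1, h1']
        · have h2' : ¬ black = u := fun h => h2 h.symm
          simp [h1, h2, h1', h2']
    · by_cases hf3 : flag = "Draw"
      · subst hf3
        have hne1 : (("Draw" : String) == "red") = false := by decide
        have hne2 : (("Draw" : String) == "black") = false := by decide
        have hb1 : (pvBump counts red (fun t => (t.1, t.2.1, t.2.2 + 1))).contains u = true := by
          rw [pv_contains_bump]; exact hu
        simp only [hne1, hne2, Bool.false_eq_true, if_false, beq_self_eq_true, if_true]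
        by_cases hbr : black = red
        · subst hbr
          simp only [bne_self_eq_false, Bool.false_eq_true, if_false]
          rw [pv_getD_bump _ _ _ _ hu]
          by_cases h1 : u = black
          · subst h1; simp
          · have h1' : ¬ black = u := fun h => h1 h.symm
            simp [h1, h1']
        · have hbr' : (black != red) = true := by simp [bne_iff_ne]; exact hbr
          simp only [hbr', if_true]
          rw [pv_getD_bump _ _ _ _ hb1, pv_getD_bump _ _ _ _ hu]
          by_cases h1 : u = red
          · subst h1
            have h2 : ¬ u = black := fun h => hbr (h.symm)
            have h2' : ¬ black = u := fun h => hbr h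
            simp [h2, h2']
          · have h1' : ¬ red = u := fun h => h1 h.symm
            by_cases h2 : u = black
            · subst h2; simp [h1, h1']
            · have h2' : ¬ black = u := fun h => h2 h.symm
              simp [h1, h2, h1', h2']
      · have g1 : (flag == "red") = false := by simp [hf1]
        have g2 : (flag == "black") = false := by simp [hf2]
        have g3 : (flag == "Draw") = false := by simp [hf3]
        simp [g1, g2, g3]

theorem pv_getD_foldl_stepB :
    ∀ (data : List (String × String × String × String)) (counts : PySem.Dict String (Int × Int × Int))
      (u : String), counts.contains u = true →
      (data.foldl pvStepB counts).getD u ((0 : Int), (0 : Int), (0 : Int))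
        = (fun t : Int × Int × Int =>
            (t.1 + (data.countP (pvW u) : Int),
             t.2.1 + (data.countP (pvL u) : Int),
             t.2.2 + (data.countP (pvD u) : Int)))
          (counts.getD u ((0 : Int), (0 : Int), (0 : Int))) := by
  intro data
  induction data with
  | nil => intro counts u hu; simp
  | cons rec rest ih =>
      intro counts u hu
      have hu' : (pvStepB counts rec).contains u = true := by rw [pv_contains_stepB]; exact hu
      simp only [List.foldl_cons, ih _ _ hu', pv_getD_stepB _ _ _ hu, List.countP_cons]
      refine Prod.ext ?_ (Prod.ext ?_ ?_) <;> simp <;> split_ifs <;> push_cast <;> ring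

theorem pv_B_eq_canon (ulist : List String) (data : List (String × String × String × String)) :
    getUsersStat_alt ulist data = pvCanon ulist data := by
  unfold getUsersStat_alt
  simp only []
  set counts0 : PySem.Dict String (Int × Int × Int) :=
    ulist.foldl (fun d u => d.insert u ((0 : Int), (0 : Int), (0 : Int))) PySem.Dict.empty with hc0
  have hk0 : counts0.keys = PySem.Set.ofList ulist := by
    rw [hc0]
    have := PySem.Dict.keys_foldl_insert (ν := Int × Int × Int) ulist
      (fun _ _ => ((0 : Int), (0 : Int), (0 : Int))) PySem.Dict.empty
    simpa [PySem.Set.update, PySem.Set.ofList] using this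
  have hnd0 : counts0.keys.Nodup := by
    rw [hc0]; exact PySem.Dict.nodup_keys_foldl_insert ulist _ _ (by simp)
  have hfold : data.foldl (fun counts rec =>
      let red := rec.2.1
      let black := rec.2.2.1
      let flag := rec.2.2.2
      if flag == "red" then
        pvBump (pvBump counts red (fun t => (t.1 + 1, t.2.1, t.2.2))) black (fun t => (t.1, t.2.1 + 1, t.2.2))
      else if flag == "black" then
        pvBump (pvBump counts black (fun t => (t.1 + 1, t.2.1, t.2.2))) red (fun t => (t.1, t.2.1 + 1, t.2.2))
      else if flag == "Draw" then
        let c1 := pvBump counts red (fun t => (t.1, t.2.1, t.2.2 + 1))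
        if black != red then pvBump c1 black (fun t => (t.1, t.2.1, t.2.2 + 1)) else c1
      else counts) counts0 = data.foldl pvStepB counts0 := rfl
  rw [hfold]
  set cF := data.foldl pvStepB counts0 with hcF
  have hkF : cF.keys = PySem.Set.ofList ulist := by
    rw [hcF]
    have : ∀ (l : List (String × String × String × String)) (d : PySem.Dict String (Int × Int × Int)),
        (l.foldl pvStepB d).keys = d.keys := by
      intro l
      induction l with
      | nil => intro d; rfl
      | cons x t ih => intro d; rw [List.foldl_cons, ih, pv_keys_stepB]
    rw [this, hk0]
  have hndF : cF.keys.Nodup := by rw [hkF, ← hk0]; exact hnd0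
  have hitems : cF.items = (PySem.Set.ofList ulist).map (fun u => (u, pvCnt data u)) := by
    rw [PySem.Dict.items_eq_map_keys cF hndF ((0 : Int), (0 : Int), (0 : Int)), hkF]
    apply List.map_congr_left
    intro u hu
    have hul : u ∈ ulist := (PySem.Set.mem_ofList ulist u).mp hu
    have hcu : counts0.contains u = true := by
      rw [PySem.Dict.contains_eq_decide_mem_keys, hk0]
      simp [PySem.Set.mem_ofList, hul]
    rw [hcF, pv_getD_foldl_stepB data counts0 u hcu, hc0, pv_getD_foldl_insert_val, if_pos hul]
    simp [pvCnt]
  rw [hitems]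
  have hfresh := PySem.Dict.items_foldl_insert_fresh
    (l := (PySem.Set.ofList ulist).map (fun u => (u, pvCnt data u)))
    (k := fun p => p.1)
    (v := fun p => [PySem.Int.toStr p.2.1, PySem.Int.toStr p.2.2.1, PySem.Int.toStr p.2.2.2])
    (d := PySem.Dict.empty)
    (by intro a _; simp)
    (by
      have : ((PySem.Set.ofList ulist).map (fun u => (u, pvCnt data u))).map (fun p => p.1)
          = PySem.Set.ofList ulist := by simp [List.map_map, Function.comp_def]
      rw [this, ← hk0]; exact hnd0)
  rw [hfresh]
  simp [pvCanon, pvVal, List.map_map, Function.comp_def]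
  rfl

-- ===== VERDICT (by name: the statement is the Claim_ definition above) =====
theorem getUsersStat_spec : Claim_equal_getUsersStat := by
  intro ulist data _
  unfold Spec_getUsersStat
  rw [pv_A_eq_canon, pv_B_eq_canon]
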